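-- pv_equiv track=rewrite | github.com/sidneycadot/qrcodes | sources/qrcode_generator/binary_codes.py | version_information_code_remainder
-- ===== SOURCE A (Python) =====
-- def version_information_code_remainder(data: int) -> int:
--
--     residual = 0b000000000000
--     rmask_hi = 0b100000000000
--     rmask_lo = 0b011111111111
--     gen_poly = 0b111100100101
--
--     dmask = 0b100000
--
--     while dmask != 0:
--
--         databit = (data & dmask) != 0
--         dmask >>= 1
--
--         residual_bit = (residual & rmask_hi) != 0
--         residual = (residual & rmask_lo) << 1
--
--         if databit ^ residual_bit:
--             residual ^= gen_poly
--
--     return residual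
-- ===== SOURCE B (Python) =====
-- def version_information_code_remainder(data: int) -> int:
--     # Polynomial long division: build the 18-bit dividend and reduce with
--     # the full 13-bit generator, shifted to align with the leading bit.
--     g = 0b1111100100101
--     code = (data & 0b111111) << 12
--     for i in range(17, 11, -1):
--         if (code >> i) & 1:
--             code ^= g << (i - 12)
--     return code
-- ===== Notes on version B (the rewrite author's own statement) =====
-- stated objective: alternative
-- what changed: Replaces the bit-serial LFSR (shift register clocked once per data bit, feedback with the 12-bit generator tail) by explicit polynomial long division: build the 18-bit dividend (data&63)<<12 and cancel leading bits with the full 13-bit generator 0b1111100100101.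
import Mathlib
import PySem

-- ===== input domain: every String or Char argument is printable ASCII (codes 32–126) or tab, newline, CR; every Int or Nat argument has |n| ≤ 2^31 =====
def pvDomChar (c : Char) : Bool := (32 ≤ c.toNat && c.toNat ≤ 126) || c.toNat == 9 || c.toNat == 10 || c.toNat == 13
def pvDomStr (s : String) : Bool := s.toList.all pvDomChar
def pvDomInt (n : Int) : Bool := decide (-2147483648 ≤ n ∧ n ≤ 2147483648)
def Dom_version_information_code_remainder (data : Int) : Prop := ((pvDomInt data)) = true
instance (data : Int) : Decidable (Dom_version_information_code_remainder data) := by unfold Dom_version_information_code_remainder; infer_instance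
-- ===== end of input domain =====

-- B replaces A's bit-serial LFSR by explicit polynomial long division with the full
-- 13-bit generator (objective: alternative decomposition, same cost).

-- ===== PORT A =====
-- the while loop of A; dmask is Python's loop mask (always a nonnegative int: 0b100000,
-- then halved each pass), kept as Nat so the recursion terminates; `>>> 1` is Python's `>>= 1`.
def viLoop (data residual : Int) (dmask : Nat) : Int :=
  if h : dmask ≠ 0 then
    let databit : Bool := PySem.Int.band data (dmask : Int) != 0
    let residual_bit : Bool := PySem.Int.band residual 2048 != 0
    let residual1 : Int := (PySem.Int.band residual 2047) <<< 1
    let residual2 : Int := if databit ^^ residual_bit then PySem.Int.bxor residual1 3877 else residual1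
    viLoop data residual2 (dmask >>> 1)
  else residual
termination_by dmask
decreasing_by simpa [Nat.shiftRight_one] using Nat.div_lt_self (Nat.pos_of_ne_zero h) one_lt_two

def version_information_code_remainder (data : Int) : Int :=
  viLoop data 0 32

-- ===== PORT B =====
-- `i.toNat` / `(i - 12).toNat` are exact: the loop indices i run over 17..12, all nonnegative.
def version_information_code_remainder_alt (data : Int) : Int :=
  let g : Int := 7973
  let code : Int := (PySem.Int.band data 63) <<< 12
  (PySem.List.pyRange 17 11 (-1)).foldl
    (fun code i =>
      if PySem.Int.band (code >>> i.toNat) 1 ≠ 0 then PySem.Int.bxor code (g <<< (i - 12).toNat)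
      else code)
    code

-- ===== PRECONDITION & SPEC =====
def Spec_version_information_code_remainder (data : Int) (out : Int) : Prop := out = version_information_code_remainder_alt data
instance (data : Int) (out : Int) : Decidable (Spec_version_information_code_remainder data out) := by unfold Spec_version_information_code_remainder; infer_instance

-- ===== CLAIM (what is proved, stated in full; the proofs are below) =====
def Claim_equal_version_information_code_remainder : Prop := ∀ (data : Int), Dom_version_information_code_remainder data → Spec_version_information_code_remainder data (version_information_code_remainder data)

-- ===== LEMMAS AND PROOFS =====

-- low-6-bit complement identity (used for negative inputs, where Python's `&` reads
-- an infinite two's-complement representation)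
lemma land_compl64 : ∀ k t : Fin 64, (63 - k.val) &&& t.val = t.val - (t.val &&& k.val) := by decide

lemma land_low (a t : Nat) (ht : t < 64) : (a % 64) &&& t = a &&& t := by
  have h63 : a &&& 63 = a % 64 := by
    simpa using Nat.and_two_pow_sub_one_eq_mod a 6
  have htt : t &&& 63 = t := by
    simpa [Nat.mod_eq_of_lt ht] using Nat.and_two_pow_sub_one_eq_mod t 6
  calc (a % 64) &&& t = (a &&& 63) &&& t := by rw [h63]
    _ = a &&& (63 &&& t) := Nat.and_assoc a 63 t
    _ = a &&& t := by rw [Nat.and_comm 63 t, htt]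

-- every Int looks, through `band · mask` for masks below 64, like some Nat below 64
lemma band_small_congr (d : Int) :
    ∃ m : Nat, m < 64 ∧ ∀ mask : Int, 0 ≤ mask → mask < 64 →
      PySem.Int.band d mask = PySem.Int.band (m : Int) mask := by
  by_cases hd : 0 ≤ d
  · refine ⟨d.toNat % 64, Nat.mod_lt _ (by norm_num), ?_⟩
    intro mask h0 h64
    rw [PySem.Int.band_of_nonneg hd h0, PySem.Int.band_of_nonneg (by positivity) h0]
    congr 1
    rw [Int.toNat_natCast]
    exact (land_low d.toNat mask.toNat (by omega)).symm
  · refine ⟨63 - (-d - 1).toNat % 64, by omega, ?_⟩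
    intro mask h0 h64
    have ht : mask.toNat < 64 := by omega
    have hk : (-d - 1).toNat % 64 < 64 := Nat.mod_lt _ (by norm_num)
    have hL : PySem.Int.band d mask = ↑(mask.toNat - (mask.toNat &&& (-d - 1).toNat)) := by
      unfold PySem.Int.band; rw [if_neg hd, if_pos h0]
    have hR : PySem.Int.band (↑(63 - (-d - 1).toNat % 64) : Int) mask
        = ↑((63 - (-d - 1).toNat % 64) &&& mask.toNat) := by
      rw [PySem.Int.band_of_nonneg (by positivity) h0, Int.toNat_natCast]
    rw [hL, hR]
    congr 1
    have h1 : mask.toNat &&& (-d - 1).toNat = mask.toNat &&& ((-d - 1).toNat % 64) := by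
      rw [Nat.and_comm mask.toNat, Nat.and_comm mask.toNat]
      exact (land_low _ _ ht).symm
    rw [h1]
    exact (land_compl64 ⟨(-d - 1).toNat % 64, hk⟩ ⟨mask.toNat, ht⟩).symm

-- A's loop only reads `data` through `band data dmask` for dmasks below 64
lemma viLoop_congr (d d' : Int)
    (h : ∀ mask : Int, 0 ≤ mask → mask < 64 → PySem.Int.band d mask = PySem.Int.band d' mask) :
    ∀ (k : Nat), k < 64 → ∀ (r : Int), viLoop d r k = viLoop d' r k := by
  intro k
  induction k using Nat.strong_induction_on with
  | _ k ih =>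
    intro hk r
    conv_lhs => rw [viLoop]
    conv_rhs => rw [viLoop]
    by_cases h0 : k ≠ 0
    · rw [dif_pos h0, dif_pos h0]
      simp only
      rw [h (k : Int) (by positivity) (by exact_mod_cast hk)]
      exact ih (k >>> 1) (by rw [Nat.shiftRight_one]; omega) (by rw [Nat.shiftRight_one]; omega) _
    · rw [dif_neg h0, dif_neg h0]

lemma alt_congr (d d' : Int)
    (h : ∀ mask : Int, 0 ≤ mask → mask < 64 → PySem.Int.band d mask = PySem.Int.band d' mask) :
    version_information_code_remainder_alt d = version_information_code_remainder_alt d' := by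
  unfold version_information_code_remainder_alt
  rw [h 63 (by norm_num) (by norm_num)]

-- structural fuel version of viLoop, used only so that `decide` can evaluate A's loop
def viLoopF (data : Int) : Nat → Int → Nat → Int
  | 0, r, _ => r
  | fuel + 1, r, k =>
    if k ≠ 0 then
      let databit : Bool := PySem.Int.band data (k : Int) != 0
      let residual_bit : Bool := PySem.Int.band r 2048 != 0
      let residual1 : Int := (PySem.Int.band r 2047) <<< 1
      let residual2 : Int := if databit ^^ residual_bit then PySem.Int.bxor residual1 3877 else residual1
      viLoopF data fuel residual2 (k >>> 1)
    else r

lemma viLoop_eq_F (d : Int) :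
    ∀ (fuel k : Nat), k < 2 ^ fuel → ∀ r, viLoop d r k = viLoopF d fuel r k := by
  intro fuel
  induction fuel with
  | zero => intro k hk r; interval_cases k; rw [viLoop]; simp [viLoopF]
  | succ n ihn =>
    intro k hk r
    conv_lhs => rw [viLoop]
    by_cases h0 : k ≠ 0
    · rw [dif_pos h0]
      simp only [viLoopF, if_pos h0]
      exact ihn (k >>> 1) (by rw [Nat.shiftRight_one]; omega) _
    · rw [dif_neg h0]; simp only [viLoopF, if_neg h0]

lemma core : ∀ m : Fin 64,
    version_information_code_remainder (m : Int) = version_information_code_remainder_alt (m : Int) := by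
  intro m
  rw [version_information_code_remainder, viLoop_eq_F _ 6 32 (by norm_num)]
  revert m
  decide

-- ===== VERDICT (by name: the statement is the Claim_ definition above) =====
theorem version_information_code_remainder_spec : Claim_equal_version_information_code_remainder := by
  intro d _
  unfold Spec_version_information_code_remainder
  obtain ⟨m, hm, h⟩ := band_small_congr d
  calc version_information_code_remainder d
      = version_information_code_remainder (m : Int) := by
        unfold version_information_code_remainder
        exact viLoop_congr d m h 32 (by norm_num) 0
    _ = version_information_code_remainder_alt (m : Int) := core ⟨m, hm⟩
    _ = version_information_code_remainder_alt d := (alt_congr d m h).symm
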